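-- pv_equiv track=rewrite | github.com/simaocunha71/pl_projeto | src/main.py | get_num_columns
-- ===== SOURCE A (Python) =====
-- def get_num_columns (line):
--     qmark_flag = False
--     count = 0
--     for c in line:
--         if not qmark_flag:
--             if(c == ","):
--                 count += 1
--             elif (c == "\""):
--                 qmark_flag = True
--         else:
--             if (c == "\""):
--                 qmark_flag = False
--     return count + 1 #ha sempre menos uma virgula do que o numero de colunas
-- ===== SOURCE B (Python) =====
-- def get_num_columns(line):
--     # even-indexed split parts are outside quotes; count commas there only
--     parts = line.split('"')
--     return 1 + sum(part.count(",") for i, part in enumerate(parts) if i % 2 == 0)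
-- ===== Notes on version B (the rewrite author's own statement) =====
-- stated objective: faster
-- what changed: Replaces the per-character quote-flag state machine with a split on the quote character followed by counting commas only in the even-indexed (outside-quote) parts, moving the work into C-level str.split/str.count.
import Mathlib
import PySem

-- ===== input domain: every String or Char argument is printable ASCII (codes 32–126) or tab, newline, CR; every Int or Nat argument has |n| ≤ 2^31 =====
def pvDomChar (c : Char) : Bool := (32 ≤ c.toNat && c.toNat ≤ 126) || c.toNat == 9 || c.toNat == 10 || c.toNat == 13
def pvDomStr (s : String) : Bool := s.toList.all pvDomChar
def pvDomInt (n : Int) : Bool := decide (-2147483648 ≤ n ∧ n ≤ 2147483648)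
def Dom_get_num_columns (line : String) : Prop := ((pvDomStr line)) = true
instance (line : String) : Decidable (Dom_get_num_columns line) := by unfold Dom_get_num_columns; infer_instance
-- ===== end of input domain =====

-- B replaces A's per-character quote-flag state machine by splitting on '"' and
-- counting commas only in the even-indexed (outside-quote) parts (objective: simpler).

-- ===== PORT A =====
def get_num_columns (line : String) : Int :=
  (line.toList.foldl
    (fun (st : Bool × Int) c =>
      if st.1 = false then
        if c = ',' then (st.1, st.2 + 1)
        else if c = '"' then (true, st.2)
        else st
      else
        if c = '"' then (false, st.2) else st)
    (false, 0)).2 + 1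

-- ===== PORT B =====
def get_num_columns_alt (line : String) : Int :=
  1 + (((PySem.List.enumerate (PySem.Chars.splitOn line.toList ['"']) 0).filter
          (fun ip => PySem.Int.mod ip.1 2 == 0)).map
        (fun ip => (PySem.Chars.count ip.2 [','] : Int))).sum

-- ===== PRECONDITION & SPEC =====
def Spec_get_num_columns (line : String) (out : Int) : Prop := out = get_num_columns_alt line
instance (line : String) (out : Int) : Decidable (Spec_get_num_columns line out) := by unfold Spec_get_num_columns; infer_instance

-- ===== CLAIM (what is proved, stated in full; the proofs are below) =====
def Claim_equal_get_num_columns : Prop := ∀ (line : String), Dom_get_num_columns line → Spec_get_num_columns line (get_num_columns line)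

-- ===== LEMMAS AND PROOFS =====

-- split of a char list at '"' (proof-side model of line.split('"'))
def pvSplitQ : List Char → List (List Char)
  | [] => [[]]
  | c :: t =>
    if c = '"' then [] :: pvSplitQ t
    else
      match pvSplitQ t with
      | [] => [[c]]
      | h :: r => (c :: h) :: r

theorem pvSplitQ_ne_nil (l : List Char) : pvSplitQ l ≠ [] := by
  cases l with
  | nil => simp [pvSplitQ]
  | cons c t =>
    simp only [pvSplitQ]
    split
    · simp
    · cases h : pvSplitQ t <;> simp

-- commas at even depth: alternating sum over the parts
def pvAltSum : Bool → List (List Char) → Nat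
  | _, [] => 0
  | false, p :: r => p.count ',' + pvAltSum true r
  | true, _ :: r => pvAltSum false r

theorem pv_count_go_singleton (a : Char) :
    ∀ (fuel : Nat) (l : List Char) (acc : Nat), l.length ≤ fuel →
      PySem.Chars.count.go [a] fuel l acc = acc + l.count a := by
  intro fuel
  induction fuel with
  | zero =>
    intro l acc h
    have : l = [] := by cases l <;> simp_all
    subst this; simp [PySem.Chars.count.go]
  | succ f ih =>
    intro l acc h
    cases l with
    | nil => simp [PySem.Chars.count.go]
    | cons c t =>
      simp only [PySem.Chars.count.go]
      by_cases hc : a = c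
      · subst hc
        simp only [List.isPrefixOf, BEq.rfl, Bool.and_true, if_true,
          List.length_singleton, List.drop_one, List.tail_cons]
        rw [ih t (acc + 1) (by simp only [List.length_cons] at h; omega)]
        simp
        omega
      · have hpre : ([a].isPrefixOf (c :: t)) = false := by
          simp [List.isPrefixOf]
          exact fun hh => hc hh
        simp only [hpre, Bool.false_eq_true, if_false]
        rw [ih t acc (by simp only [List.length_cons] at h; omega)]
        simp [List.count_cons]
        intro hh; exact absurd hh.symm hc

theorem pv_count_singleton (l : List Char) (a : Char) :
    PySem.Chars.count l [a] = l.count a := by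
  simp only [PySem.Chars.count, List.isEmpty_cons, Bool.false_eq_true, if_false]
  simpa using pv_count_go_singleton a l.length l 0 (le_refl _)

theorem pv_splitOn_go_q :
    ∀ (fuel : Nat) (l cur : List Char) (acc : List (List Char)), l.length < fuel →
      PySem.Chars.splitOn.go ['"'] fuel l cur acc =
        acc.reverse ++
          (match pvSplitQ l with
           | [] => [cur.reverse]
           | h :: t => (cur.reverse ++ h) :: t) := by
  intro fuel
  induction fuel with
  | zero => intro l cur acc h; omega
  | succ f ih =>
    intro l cur acc h
    cases l with
    | nil =>
      simp [PySem.Chars.splitOn.go, pvSplitQ]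
    | cons c t =>
      simp only [PySem.Chars.splitOn.go]
      by_cases hc : c = '"'
      · subst hc
        have hpre : (['"'].isPrefixOf ('"' :: t)) = true := by simp [List.isPrefixOf]
        simp only [hpre, if_true, List.length_singleton, List.drop_one, List.tail_cons]
        rw [ih t [] (cur.reverse :: acc) (by simp only [List.length_cons] at h; omega)]
        simp only [pvSplitQ, if_true]
        rcases hsp : pvSplitQ t with _ | ⟨h1, t1⟩
        · exact absurd hsp (pvSplitQ_ne_nil t)
        · simp
      · have hpre : (['"'].isPrefixOf (c :: t)) = false := by
          simp [List.isPrefixOf]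
          exact fun hh => hc hh.symm
        simp only [hpre, Bool.false_eq_true, if_false]
        rw [ih t (c :: cur) acc (by simp only [List.length_cons] at h; omega)]
        simp only [pvSplitQ, hc, if_false]
        rcases hsp : pvSplitQ t with _ | ⟨h1, t1⟩
        · exact absurd hsp (pvSplitQ_ne_nil t)
        · simp

theorem pv_splitOn_q (l : List Char) :
    PySem.Chars.splitOn l ['"'] = pvSplitQ l := by
  show PySem.Chars.splitOn.go ['"'] (l.length + 1) l [] [] = pvSplitQ l
  rw [pv_splitOn_go_q (l.length + 1) l [] [] (by omega)]
  rcases hsp : pvSplitQ l with _ | ⟨h1, t1⟩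
  · exact absurd hsp (pvSplitQ_ne_nil l)
  · simp

theorem pv_mod2 (a : Int) : PySem.Int.mod a 2 = a % 2 :=
  PySem.Int.mod_eq_emod_of_pos (by norm_num)

-- B side: the enumerate/filter/sum equals the alternating sum (flag = parity of start)
theorem pv_B_sum (parts : List (List Char)) :
    ∀ (s : Int),
      (((PySem.List.enumerate parts s).filter (fun ip => ip.1 % 2 == 0)).map
        (fun ip => (PySem.Chars.count ip.2 [','] : Int))).sum
        = (pvAltSum (s % 2 == 1) parts : Int) := by
  induction parts with
  | nil => intro s; simp [PySem.List.enumerate_nil, pvAltSum]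
  | cons p rest ih =>
    intro s
    have hb : 0 ≤ s % 2 := Int.emod_nonneg s (by norm_num)
    have hb2 : s % 2 < 2 := Int.emod_lt_of_pos s (by norm_num)
    rw [PySem.List.enumerate_cons]
    by_cases h0 : s % 2 = 0
    · have h1 : (s + 1) % 2 = 1 := by omega
      simp only [List.filter_cons, h0]
      norm_num
      rw [ih (s + 1), h1]
      simp [pvAltSum, pv_count_singleton]
    · have h1 : s % 2 = 1 := by omega
      have h2 : (s + 1) % 2 = 0 := by omega
      simp only [List.filter_cons, h1]
      norm_num
      rw [ih (s + 1), h2]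
      simp [pvAltSum]

-- A side: the quote-flag fold equals the alternating sum over the split
theorem pv_A_fold (l : List Char) :
    ∀ (flag : Bool) (cnt : Int),
      (l.foldl
        (fun (st : Bool × Int) c =>
          if st.1 = false then
            if c = ',' then (st.1, st.2 + 1)
            else if c = '"' then (true, st.2)
            else st
          else
            if c = '"' then (false, st.2) else st)
        (flag, cnt)).2 = cnt + (pvAltSum flag (pvSplitQ l) : Int) := by
  have hq : ('"' : Char) ≠ ',' := by decide
  induction l with
  | nil =>
    intro flag cnt
    cases flag <;> simp [pvSplitQ, pvAltSum]
  | cons c t ih =>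
    intro flag cnt
    rw [List.foldl_cons]
    cases flag with
    | false =>
      by_cases hcm : c = ','
      · subst hcm
        norm_num
        rw [ih false (cnt + 1)]
        simp only [pvSplitQ]
        rcases hsp : pvSplitQ t with _ | ⟨h1, t1⟩
        · exact absurd hsp (pvSplitQ_ne_nil t)
        · simp [pvAltSum]
          ring
      · by_cases hcq : c = '"'
        · subst hcq
          norm_num [hq]
          rw [ih true cnt]
          simp [pvSplitQ, pvAltSum]
        · norm_num [hcm, hcq, if_true]
          rw [ih false cnt]
          simp only [pvSplitQ, if_neg hcq]
          rcases hsp : pvSplitQ t with _ | ⟨h1, t1⟩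
          · exact absurd hsp (pvSplitQ_ne_nil t)
          · simp [pvAltSum, hcm]
    | true =>
      by_cases hcq : c = '"'
      · subst hcq
        norm_num
        rw [ih false cnt]
        simp [pvSplitQ, pvAltSum]
      · norm_num [hcq, if_true]
        rw [ih true cnt]
        simp only [pvSplitQ, if_neg hcq]
        rcases hsp : pvSplitQ t with _ | ⟨h1, t1⟩
        · exact absurd hsp (pvSplitQ_ne_nil t)
        · simp [pvAltSum]

-- ===== VERDICT (by name: the statement is the Claim_ definition above) =====
theorem get_num_columns_spec : Claim_equal_get_num_columns := by
  intro line _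
  show get_num_columns line = get_num_columns_alt line
  unfold get_num_columns get_num_columns_alt
  simp only [pv_mod2]
  rw [pv_A_fold line.toList false 0, pv_splitOn_q, pv_B_sum (pvSplitQ line.toList) 0]
  have h01 : ((0 : Int) % 2 == 1) = false := by decide
  rw [h01]
  omega
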